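-- pv_equiv track=rewrite | github.com/PPolczynski/aoc | y2025/d03/solution.py | max_subsequence_value
-- ===== SOURCE A (Python) =====
-- def max_subsequence_value(numbers: list[int]) -> int:
--     first, second = 0, 0
--     last_idx = len(numbers) - 1
--     for idx, value in enumerate(numbers):
--         if value > first and idx != last_idx:
--             first = value
--             second = 0
--         elif value > second:
--             second = value
--     return first * 10 + second
-- ===== SOURCE B (Python) =====
-- def max_subsequence_value(numbers: list[int]) -> int:
--     if not numbers:
--         return 0
--     first, k = 0, -1
--     for i, v in enumerate(numbers[:-1]):
--         if v > first:
--             first, k = v, i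
--     second = 0
--     for v in numbers[k + 1:]:
--         if v > second:
--             second = v
--     return first * 10 + second
-- ===== Notes on version B (the rewrite author's own statement) =====
-- stated objective: alternative
-- what changed: Replaces A's single stateful loop (coupled first/second with a reset on every first-update) by two independent sequential passes: one pass over numbers[:-1] finding the running maximum and the index of its first occurrence, then one clamped-max pass over the suffix after that index.
import Mathlib
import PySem

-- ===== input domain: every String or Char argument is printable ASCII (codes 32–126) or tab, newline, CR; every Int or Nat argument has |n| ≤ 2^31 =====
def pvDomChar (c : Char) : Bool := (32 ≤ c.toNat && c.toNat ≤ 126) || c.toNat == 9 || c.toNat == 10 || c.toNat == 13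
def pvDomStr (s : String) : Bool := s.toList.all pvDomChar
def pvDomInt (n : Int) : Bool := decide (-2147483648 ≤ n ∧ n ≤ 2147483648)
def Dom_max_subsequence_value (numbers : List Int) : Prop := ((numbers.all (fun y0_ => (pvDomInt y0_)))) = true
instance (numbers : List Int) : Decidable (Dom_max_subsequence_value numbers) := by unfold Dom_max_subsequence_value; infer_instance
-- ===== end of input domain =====

-- B replaces A's single stateful loop by two independent passes (prefix running-max with
-- first-occurrence index, then a clamped max over the suffix after it): an alternative
-- decomposition of the same O(n) task.


-- ===== PORT A =====
def max_subsequence_value (numbers : List Int) : Int :=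
  let last_idx : Int := (numbers.length : Int) - 1
  let fs := (PySem.List.enumerate numbers 0).foldl
    (fun (fs : Int × Int) (p : Int × Int) =>
      if p.2 > fs.1 ∧ p.1 ≠ last_idx then (p.2, 0)
      else if p.2 > fs.2 then (fs.1, p.2)
      else fs) (0, 0)
  fs.1 * 10 + fs.2

-- ===== PORT B =====
def max_subsequence_value_alt (numbers : List Int) : Int :=
  if numbers = [] then 0
  else
    let fk := (PySem.List.enumerate (PySem.List.slice numbers none (some (-1))) 0).foldl
      (fun (fk : Int × Int) (p : Int × Int) => if p.2 > fk.1 then (p.2, p.1) else fk) (0, -1)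
    let second := (PySem.List.slice numbers (some (fk.2 + 1)) none).foldl
      (fun (s : Int) (v : Int) => if v > s then v else s) 0
    fk.1 * 10 + second

-- ===== PRECONDITION & SPEC =====
def Spec_max_subsequence_value (numbers : List Int) (out : Int) : Prop := out = max_subsequence_value_alt numbers
instance (numbers : List Int) (out : Int) : Decidable (Spec_max_subsequence_value numbers out) := by unfold Spec_max_subsequence_value; infer_instance

-- ===== CLAIM (what is proved, stated in full; the proofs are below) =====
def Claim_equal_max_subsequence_value : Prop := ∀ (numbers : List Int), Dom_max_subsequence_value numbers → Spec_max_subsequence_value numbers (max_subsequence_value numbers)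

-- ===== LEMMAS AND PROOFS =====

-- A's loop step with the `idx != last_idx` guard dropped (valid on all non-last indices).
def pvStepA (fs : Int × Int) (p : Int × Int) : Int × Int :=
  if p.2 > fs.1 then (p.2, 0) else if p.2 > fs.2 then (fs.1, p.2) else fs

-- B's first-pass step.
def pvStepB (fk : Int × Int) (p : Int × Int) : Int × Int :=
  if p.2 > fk.1 then (p.2, p.1) else fk

-- B's second-pass step / clamped maximum.
def pvMax0 (l : List Int) : Int := l.foldl (fun s v => if v > s then v else s) 0

-- Core invariant relating A's guardless fold and B's two passes on the same list.
lemma pv_core (xs : List Int) :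
    ((PySem.List.enumerate xs 0).foldl pvStepA (0, 0)).1
      = ((PySem.List.enumerate xs 0).foldl pvStepB (0, -1)).1
    ∧ ((PySem.List.enumerate xs 0).foldl pvStepA (0, 0)).2
      = pvMax0 (xs.drop (((PySem.List.enumerate xs 0).foldl pvStepB (0, -1)).2 + 1).toNat)
    ∧ -1 ≤ ((PySem.List.enumerate xs 0).foldl pvStepB (0, -1)).2
    ∧ ((PySem.List.enumerate xs 0).foldl pvStepB (0, -1)).2 < (xs.length : Int) := by
  induction xs using List.reverseRecOn with
  | nil => simp [pvMax0]
  | append_singleton ys v ih =>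
    obtain ⟨h1, h2, h3, h4⟩ := ih
    rw [PySem.List.enumerate_append]
    simp only [List.foldl_append]
    set A := (PySem.List.enumerate ys 0).foldl pvStepA (0, 0) with hA
    set B := (PySem.List.enumerate ys 0).foldl pvStepB (0, -1) with hB
    simp only [PySem.List.enumerate_cons, PySem.List.enumerate_nil, List.foldl_cons, List.foldl_nil]
    by_cases hv : v > A.1
    · have hvB : v > B.1 := h1 ▸ hv
      have htn : ((0 : Int) + (ys.length : Int) + 1).toNat = ys.length + 1 := by omega
      have hnil : List.drop (ys.length + 1) (ys ++ [v]) = [] :=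
        List.drop_eq_nil_of_le (by simp)
      refine ⟨?_, ?_, ?_, ?_⟩ <;>
        simp [pvStepA, pvStepB, hv, hvB, hnil, pvMax0]
    · have hv' : ¬ v > B.1 := h1 ▸ hv
      have hkle : (B.2 + 1).toNat ≤ ys.length := by omega
      have hdrop : List.drop (B.2 + 1).toNat (ys ++ [v]) = List.drop (B.2 + 1).toNat ys ++ [v] :=
        List.drop_append_of_le_length hkle
      have hmax : pvMax0 (List.drop (B.2 + 1).toNat ys ++ [v])
          = if v > pvMax0 (List.drop (B.2 + 1).toNat ys) then v else pvMax0 (List.drop (B.2 + 1).toNat ys) := by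
        simp [pvMax0, List.foldl_append]
      rw [← h2] at hmax
      by_cases hs : v > A.2 <;>
        refine ⟨?_, ?_, ?_, ?_⟩ <;>
          simp [pvStepA, pvStepB, hv', hs, hdrop, hmax, h1] <;> omega

-- On the prefix of a nonempty list, A's guarded step agrees with the guardless pvStepA.
lemma pv_guard (ys : List Int) (z : Int) :
    (PySem.List.enumerate ys 0).foldl
      (fun (fs : Int × Int) (p : Int × Int) =>
        if p.2 > fs.1 ∧ p.1 ≠ ((ys ++ [z]).length : Int) - 1 then (p.2, 0)
        else if p.2 > fs.2 then (fs.1, p.2)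
        else fs) (0, 0)
      = (PySem.List.enumerate ys 0).foldl pvStepA (0, 0) := by
  apply PySem.List.foldl_congr_mem
  intro acc p hp
  rcases (PySem.List.mem_enumerate_iff _ _ _).1 hp with ⟨k, hk, rfl⟩
  have hkne : ¬ k = ys.length := Nat.ne_of_lt hk
  simp [pvStepA, hkne]

-- ===== VERDICT (by name: the statement is the Claim_ definition above) =====
theorem max_subsequence_value_spec : Claim_equal_max_subsequence_value := by
  intro numbers _
  unfold Spec_max_subsequence_value
  induction numbers using List.reverseRecOn with
  | nil => rfl
  | append_singleton ys z _ =>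
    obtain ⟨h1, h2, h3, h4⟩ := pv_core ys
    unfold max_subsequence_value max_subsequence_value_alt
    simp only [if_neg (by simp : ¬ ys ++ [z] = [])]
    rw [PySem.List.slice_to_neg_one, List.dropLast_concat]
    rw [PySem.List.enumerate_append, List.foldl_append, pv_guard ys z]
    have hBl : (fun (fk : Int × Int) (p : Int × Int) => if p.2 > fk.1 then (p.2, p.1) else fk) = pvStepB := rfl
    rw [hBl]
    simp only [PySem.List.enumerate_cons, PySem.List.enumerate_nil, List.foldl_cons, List.foldl_nil]
    set A := (PySem.List.enumerate ys 0).foldl pvStepA (0, 0) with hA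
    set B := (PySem.List.enumerate ys 0).foldl pvStepB (0, -1) with hB
    have hlast : ¬ ((0 : Int) + ys.length ≠ ((ys ++ [z]).length : Int) - 1) := by simp
    rw [PySem.List.slice_from (ys ++ [z]) (by omega : (0:Int) ≤ B.2 + 1)]
    have hkle : (B.2 + 1).toNat ≤ ys.length := by omega
    rw [List.drop_append_of_le_length hkle]
    have hmax : (List.drop (B.2 + 1).toNat ys ++ [z]).foldl (fun s v => if v > s then v else s) 0
        = if z > pvMax0 (List.drop (B.2 + 1).toNat ys) then z else pvMax0 (List.drop (B.2 + 1).toNat ys) := by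
      simp [pvMax0, List.foldl_append]
    rw [← h2] at hmax
    rw [hmax]
    by_cases hz : z > A.2 <;> simp [hz, h1]
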